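-- pv_equiv track=rewrite | github.com/SAG145/Project-Euler | PEP365 - A Huge Binomial Coefficient.py | fac_mod
-- ===== SOURCE A (Python) =====
-- def fac_mod(n,p):
--     if n <= p:
--         m = 1
--         for i in range(2,n + 1):
--             m *= i
--         m %= p
--         return m
--     t = n // p
--     return ((-1)**t*fac_mod(n % p,p)*fac_mod(t,p)) % p
-- ===== SOURCE B (Python) =====
-- def fac_mod(n, p):
--     # Iterative version: walk down the base-p digit chain with an accumulator
--     # instead of self-recursion.
--     def fac_of(m):
--         r = 1
--         for i in range(2, m + 1):
--             r *= i
--         return r % p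
--
--     result = 1
--     while n > p:
--         t = n // p
--         result = (result * (-1) ** t * fac_of(n % p)) % p
--         n = t
--     return (result * fac_of(n)) % p
-- ===== Notes on version B (the rewrite author's own statement) =====
-- stated objective: alternative
-- what changed: Replaces A's self-recursion over the base-p digit recurrence by a single iterative while-loop over n's base-p digits that folds the sign and the base-chunk factorials into one running accumulator modulo p.
import Mathlib
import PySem

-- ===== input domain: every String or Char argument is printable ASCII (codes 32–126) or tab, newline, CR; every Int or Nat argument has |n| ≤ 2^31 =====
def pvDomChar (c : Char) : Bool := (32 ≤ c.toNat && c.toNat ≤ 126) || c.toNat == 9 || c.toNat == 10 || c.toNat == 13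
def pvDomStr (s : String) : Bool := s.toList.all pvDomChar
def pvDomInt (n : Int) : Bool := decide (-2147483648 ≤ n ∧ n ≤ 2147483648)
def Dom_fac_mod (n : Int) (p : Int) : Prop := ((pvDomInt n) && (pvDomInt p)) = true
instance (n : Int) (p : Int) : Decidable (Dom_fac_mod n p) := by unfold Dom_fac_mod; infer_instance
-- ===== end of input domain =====

-- B replaces A's self-recursion on the base-p digit recurrence by one iterative
-- accumulator loop over n's base-p digits (alternative decomposition, same cost).


-- ===== PORT A =====
-- Fuel-based transliteration of A's self-recursion (fuel n.toNat + 1 is enough on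
-- Pre_, where both recursive arguments are nonnegative and strictly smaller than n;
-- fuel 0 returns 0, unreachable on Pre_).  Python's (-1)**t is ported as
-- (-1)^t.toNat, exact here because on Pre_ the recursive branch only runs with
-- t = n // p ≥ 1.
def fac_mod_fuel : Nat → Int → Int → Int
  | 0, _, _ => 0
  | fuel+1, n, p =>
    if n ≤ p then
      PySem.Int.mod ((PySem.List.pyRange 2 (n + 1) 1).foldl (fun m i => m * i) 1) p
    else
      let t := PySem.Int.floordiv n p
      PySem.Int.mod ((-1) ^ t.toNat * fac_mod_fuel fuel (PySem.Int.mod n p) p *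
        fac_mod_fuel fuel t p) p

def fac_mod (n : Int) (p : Int) : Int := fac_mod_fuel (n.toNat + 1) n p

-- ===== PORT B =====
-- B's helper fac_of: product of 2..m, then % p.
def pyFacOf (m : Int) (p : Int) : Int :=
  PySem.Int.mod ((PySem.List.pyRange 2 (m + 1) 1).foldl (fun r i => r * i) 1) p

-- B's while-loop as fuel-bounded tail recursion over the accumulator `result`
-- (fuel n.toNat + 1 is enough on Pre_; on fuel exhaustion the accumulator is
-- returned, unreachable on Pre_).
def fac_mod_alt_loop : Nat → Int → Int → Int → Int
  | 0, result, _, _ => result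
  | fuel+1, result, n, p =>
    if n > p then
      let t := PySem.Int.floordiv n p
      fac_mod_alt_loop fuel
        (PySem.Int.mod (result * (-1) ^ t.toNat * pyFacOf (PySem.Int.mod n p) p) p) t p
    else
      PySem.Int.mod (result * pyFacOf n p) p

def fac_mod_alt (n : Int) (p : Int) : Int := fac_mod_alt_loop (n.toNat + 1) 1 n p

-- ===== PRECONDITION & SPEC =====
-- Pre_ holds exactly where Python A returns: it excludes p = 0 (ZeroDivisionError)
-- and p ≤ 1 with n > p (unbounded recursion, RecursionError).
def Pre_fac_mod (n : Int) (p : Int) : Prop := 2 ≤ p ∨ (n ≤ p ∧ p ≠ 0)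
instance (n : Int) (p : Int) : Decidable (Pre_fac_mod n p) := by unfold Pre_fac_mod; infer_instance

def pvWitness_fac_mod : Int × Int := (100, 7)

def Spec_fac_mod (n : Int) (p : Int) (out : Int) : Prop := out = fac_mod_alt n p
instance (n : Int) (p : Int) (out : Int) : Decidable (Spec_fac_mod n p out) := by unfold Spec_fac_mod; infer_instance

-- ===== CLAIM (what is proved, stated in full; the proofs are below) =====
def Claim_equal_fac_mod : Prop := ∀ (n : Int) (p : Int), Dom_fac_mod n p → Pre_fac_mod n p → Spec_fac_mod n p (fac_mod n p)

-- ===== LEMMAS AND PROOFS =====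

-- Python's `%` is idempotent for any nonzero modulus.
theorem pv_mod_mod (a p : Int) : PySem.Int.mod (PySem.Int.mod a p) p = PySem.Int.mod a p := by
  simp [PySem.Int.mod, Int.fmod_fmod]

-- With positive fuel, the base case of A's port is B's helper.
theorem fac_mod_fuel_base (f : Nat) (n p : Int) (hf : 0 < f) (h : n ≤ p) :
    fac_mod_fuel f n p = pyFacOf n p := by
  cases f with
  | zero => omega
  | succ f => simp [fac_mod_fuel, pyFacOf, h]

-- A's port always returns a value of the form `_ % p`.
theorem fac_mod_fuel_mod (f : Nat) (n p : Int) (hf : 0 < f) :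
    PySem.Int.mod (fac_mod_fuel f n p) p = fac_mod_fuel f n p := by
  cases f with
  | zero => omega
  | succ f =>
    simp only [fac_mod_fuel]
    split <;> exact pv_mod_mod _ _

-- Key loop invariant: for p ≥ 2 and enough fuel, B's loop computes
-- (result * A's value) % p.
theorem fac_mod_alt_loop_eq (f : Nat) : ∀ (n p r : Int), 2 ≤ p → n.toNat < f →
    fac_mod_alt_loop f r n p = PySem.Int.mod (r * fac_mod_fuel f n p) p := by
  induction f with
  | zero => intro n p r _ hf; omega
  | succ f ih =>
    intro n p r hp hf
    by_cases h : n ≤ p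
    · simp only [fac_mod_alt_loop, fac_mod_fuel, h, if_pos, not_lt.mpr h, if_neg, gt_iff_lt]
      simp [pyFacOf, h, not_lt.mpr h]
    · have hn : p < n := by omega
      have ht1 : 1 ≤ PySem.Int.floordiv n p := by
        rw [PySem.Int.le_floordiv_iff_mul_le (by omega)]; omega
      have ht2 : PySem.Int.floordiv n p < n := by
        rw [PySem.Int.floordiv_lt_iff_lt_mul (by omega)]; nlinarith
      have hm1 : 0 ≤ PySem.Int.mod n p := PySem.Int.mod_nonneg _ (by omega)
      have hm2 : PySem.Int.mod n p < p := PySem.Int.mod_lt _ (by omega)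
      have hfuel : (PySem.Int.floordiv n p).toNat < f := by omega
      simp only [fac_mod_alt_loop, fac_mod_fuel, gt_iff_lt, hn, if_pos, not_le.mpr hn, if_false]
      rw [ih _ _ _ hp hfuel]
      rw [fac_mod_fuel_base f (PySem.Int.mod n p) p (by omega) (by omega)]
      -- pure modular arithmetic, over Int.fmod with positive modulus
      simp only [PySem.Int.mod_eq_emod_of_pos (show (0:Int) < p by omega)]
      conv_lhs => rw [Int.mul_emod, Int.emod_emod_of_dvd _ dvd_rfl, ← Int.mul_emod]
      conv_rhs => rw [Int.mul_emod, Int.emod_emod_of_dvd _ dvd_rfl, ← Int.mul_emod]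
      ring_nf

-- ===== VERDICT (by name: the statement is the Claim_ definition above) =====
theorem fac_mod_spec : Claim_equal_fac_mod := by
  intro n p _ hpre
  unfold Spec_fac_mod fac_mod fac_mod_alt
  rcases hpre with hp | ⟨hle, hne⟩
  · rw [fac_mod_alt_loop_eq (n.toNat + 1) n p 1 hp (by omega), one_mul,
        fac_mod_fuel_mod _ _ _ (by omega)]
  · rw [fac_mod_fuel_base _ _ _ (by omega) hle]
    simp only [fac_mod_alt_loop, gt_iff_lt, not_lt.mpr hle, if_neg, one_mul]
    unfold pyFacOf
    exact (pv_mod_mod _ _).symm
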